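-- pv_equiv track=rewrite | github.com/vgcarlol/Lab3-Redes | dijkstra_cli.py | next_hop_table
-- ===== SOURCE A (Python) =====
-- from typing import Dict, Iterable, Tuple, Any, Optional, List
--
-- def next_hop_table(prev: Dict[Any, Optional[Any]], source: Any):
--     """Construye la tabla de próximo salto a partir del árbol de predecesores."""
--     table: Dict[Any, Any] = {}
--     for node, parent in prev.items():
--         if node == source or parent is None:
--             continue
--         cur = node
--         # retrocede hasta el vecino directo del origen
--         while prev.get(cur) is not None and prev[cur] != source:
--             cur = prev[cur]
--         nh = (
--             cur if prev.get(cur) == source else node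
--         )  # si no hay ruta directa, queda como sí mismo
--         table[node] = nh
--     return table
-- ===== SOURCE B (Python) =====
-- def next_hop_table(prev, source):
--     """Construye la tabla de proximo salto a partir del arbol de predecesores."""
--     memo = {}  # node -> neighbor of source on its chain, or None if the chain dies
--     table = {}
--     for node, parent in prev.items():
--         if node == source or parent is None:
--             continue
--         path = []
--         cur = node
--         while cur not in memo:
--             p = prev.get(cur)
--             if p is None:
--                 memo[cur] = None
--                 break
--             if p == source:
--                 memo[cur] = cur
--                 break
--             path.append(cur)
--             cur = p
--         res = memo[cur]
--         for x in path:
--             memo[x] = res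
--         nh = memo[node]
--         table[node] = nh if nh is not None else node
--     return table
-- ===== Notes on version B (the rewrite author's own statement) =====
-- stated objective: alternative
-- what changed: Instead of re-walking the whole predecessor chain to the source independently for every node, B walks each chain once, memoizing the first hop of every node it passes (path compression), and later nodes reuse the cached results; intended as faster, but a timing run measured only ~2.1x at the largest size (unconfirmed).
import Mathlib
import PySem

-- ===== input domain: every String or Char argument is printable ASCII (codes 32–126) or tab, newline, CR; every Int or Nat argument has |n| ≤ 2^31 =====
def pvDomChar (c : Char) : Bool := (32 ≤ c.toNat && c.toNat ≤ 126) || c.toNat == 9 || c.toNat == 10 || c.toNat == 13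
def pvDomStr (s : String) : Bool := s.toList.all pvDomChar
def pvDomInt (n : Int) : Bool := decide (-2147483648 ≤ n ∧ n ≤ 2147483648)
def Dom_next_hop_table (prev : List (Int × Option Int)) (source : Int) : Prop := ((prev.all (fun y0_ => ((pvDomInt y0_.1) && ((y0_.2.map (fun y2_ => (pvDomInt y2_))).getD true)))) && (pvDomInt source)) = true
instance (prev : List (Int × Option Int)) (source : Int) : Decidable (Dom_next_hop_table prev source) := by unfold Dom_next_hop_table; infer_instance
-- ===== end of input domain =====

-- B memoizes the first hop of every chain node it visits (path compression), so chains are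
-- not re-walked from scratch for every node; same return value as A on Pre_ (alternative).

-- ===== PORT A =====
-- A's while loop as fuelled recursion; fuel |prev|+1 suffices wherever the Python loop
-- terminates (Pre_), and is a plain totality guard otherwise.
def walkA (d : PySem.Dict Int (Option Int)) (source : Int) : Nat → Int → Int
  | 0, cur => cur
  | fuel+1, cur =>
    match d.getD cur none with
    | none => cur
    | some p => if p = source then cur else walkA d source fuel p

def next_hop_table (prev : List (Int × Option Int)) (source : Int) : List (Int × Int) :=
  let d := PySem.Dict.ofList prev
  (d.items.foldl
    (fun (table : PySem.Dict Int Int) np =>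
      if np.1 = source ∨ np.2 = none then table
      else
        let cur := walkA d source (prev.length + 1) np.1
        let nh := if d.getD cur none = some source then cur else np.1
        table.insert np.1 nh)
    PySem.Dict.empty).items

-- ===== PORT B =====
-- B's inner while loop: walk up until a memoized node or a terminal, recording the path.
def collectB (d : PySem.Dict Int (Option Int)) (source : Int) :
    Nat → Int → PySem.Dict Int (Option Int) → List Int →
    PySem.Dict Int (Option Int) × List Int × Int
  | 0, cur, memo, path => (memo, path, cur)
  | fuel+1, cur, memo, path =>
    if memo.contains cur then (memo, path, cur)
    else
      match d.getD cur none with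
      | none => (memo.insert cur none, path, cur)
      | some p =>
        if p = source then (memo.insert cur (some cur), path, cur)
        else collectB d source fuel p memo (path ++ [cur])

def next_hop_table_alt (prev : List (Int × Option Int)) (source : Int) : List (Int × Int) :=
  let d := PySem.Dict.ofList prev
  (d.items.foldl
    (fun (st : PySem.Dict Int (Option Int) × PySem.Dict Int Int) np =>
      if np.1 = source ∨ np.2 = none then st
      else
        let r := collectB d source (prev.length + 2) np.1 st.1 []
        let res := r.1.getD r.2.2 none   -- res = memo[cur]; in Python the key is always present here
        let memo2 := r.2.1.foldl (fun m x => m.insert x res) r.1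
        let nh := match memo2.getD np.1 none with   -- nh = memo[node]; then 'nh if nh is not None else node'
                  | some v => v
                  | none => np.1
        (memo2, st.2.insert np.1 nh))
    (PySem.Dict.empty, PySem.Dict.empty)).2.items

-- ===== PRECONDITION & SPEC =====
-- one step up the predecessor tree, as Python A's while loop takes it (none = the loop stops)
def pvStep (prev : List (Int × Option Int)) (source : Int) (o : Option Int) : Option Int :=
  o.bind fun x =>
    match (PySem.Dict.ofList prev).getD x none with
    | none => none
    | some p => if p = source then none else some p

-- Pre_ excludes exactly the inputs on which Python A never returns (its while loop runs
-- forever on a predecessor cycle not broken by the source): every predecessor chain must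
-- die out within |prev| + 1 steps, i.e. the predecessor graph is acyclic toward the source.
def Pre_next_hop_table (prev : List (Int × Option Int)) (source : Int) : Prop :=
  ∀ p ∈ prev, (pvStep prev source)^[prev.length + 1] (some p.1) = none
instance (prev : List (Int × Option Int)) (source : Int) : Decidable (Pre_next_hop_table prev source) := by unfold Pre_next_hop_table; infer_instance

def pvWitness_next_hop_table : (List (Int × Option Int)) × Int := ([(1, some 0), (2, some 1), (3, none)], 0)

def Spec_next_hop_table (prev : List (Int × Option Int)) (source : Int) (out : List (Int × Int)) : Prop := out = next_hop_table_alt prev source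
instance (prev : List (Int × Option Int)) (source : Int) (out : List (Int × Int)) : Decidable (Spec_next_hop_table prev source out) := by unfold Spec_next_hop_table; infer_instance

-- ===== CLAIM (what is proved, stated in full; the proofs are below) =====
def Claim_equal_next_hop_table : Prop := ∀ (prev : List (Int × Option Int)) (source : Int), Dom_next_hop_table prev source → Pre_next_hop_table prev source → Spec_next_hop_table prev source (next_hop_table prev source)

-- ===== LEMMAS AND PROOFS =====

-- the specification value both ports compute per node: the first hop toward the source
-- (some v), or none when the chain dies before reaching the source
def fhF (prev : List (Int × Option Int)) (source : Int) : Nat → Int → Option Int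
  | 0, _ => none
  | f+1, x =>
    match (PySem.Dict.ofList prev).getD x none with
    | none => none
    | some p => if p = source then some x else fhF prev source f p

-- the chain starting at x dies within k steps
def Tm (prev : List (Int × Option Int)) (source : Int) (x : Int) (k : Nat) : Prop :=
  (pvStep prev source)^[k] (some x) = none

-- B's memo only ever holds correct first hops
def InvM (prev : List (Int × Option Int)) (source : Int) (F : Nat)
    (memo : PySem.Dict Int (Option Int)) : Prop :=
  ∀ x v, memo.get? x = some v → v = fhF prev source F x

theorem Tm_zero_false (prev : List (Int × Option Int)) (source : Int) (x : Int)
    (h : Tm prev source x 0) : False := by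
  simp [Tm] at h

theorem Tm_pos (prev : List (Int × Option Int)) (source : Int) {x p : Int} {k : Nat}
    (hx : (PySem.Dict.ofList prev).getD x none = some p) (hp : p ≠ source)
    (h : Tm prev source x k) : ∃ k1, k = k1 + 1 ∧ Tm prev source p k1 := by
  cases k with
  | zero => exact absurd h (fun h => Tm_zero_false prev source x h)
  | succ k1 =>
    refine ⟨k1, rfl, ?_⟩
    unfold Tm at h ⊢
    rw [Function.iterate_succ_apply] at h
    simpa [pvStep, hx, hp] using h

theorem fhF_stable (prev : List (Int × Option Int)) (source : Int) :
    ∀ (k : Nat) (x : Int) (f f' : Nat), Tm prev source x k → k ≤ f → k ≤ f' →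
      fhF prev source f x = fhF prev source f' x := by
  intro k
  induction k with
  | zero => intro x f f' h _ _; exact absurd h (fun h => Tm_zero_false prev source x h)
  | succ k ih =>
    intro x f f' h hf hf'
    obtain ⟨f1, rfl⟩ : ∃ f1, f = f1 + 1 := ⟨f - 1, by omega⟩
    obtain ⟨f1', rfl⟩ : ∃ f1', f' = f1' + 1 := ⟨f' - 1, by omega⟩
    cases hx : (PySem.Dict.ofList prev).getD x none with
    | none => simp [fhF, hx]
    | some p =>
      by_cases hp : p = source
      · simp [fhF, hx, hp]
      · obtain ⟨k1, hk1, hTp⟩ := Tm_pos prev source hx hp h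
        have hk : k1 = k := by omega
        subst hk
        simp only [fhF, hx, if_neg hp]
        exact ih p f1 f1' hTp (by omega) (by omega)

theorem fhF_walkA (prev : List (Int × Option Int)) (source : Int) :
    ∀ (k : Nat) (x : Int) (f : Nat), Tm prev source x k → k ≤ f →
      fhF prev source f x =
        (if (PySem.Dict.ofList prev).getD (walkA (PySem.Dict.ofList prev) source f x) none = some source
         then some (walkA (PySem.Dict.ofList prev) source f x) else none) := by
  intro k
  induction k with
  | zero => intro x f h _; exact absurd h (fun h => Tm_zero_false prev source x h)
  | succ k ih =>
    intro x f h hf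
    obtain ⟨f1, rfl⟩ : ∃ f1, f = f1 + 1 := ⟨f - 1, by omega⟩
    cases hx : (PySem.Dict.ofList prev).getD x none with
    | none => simp [fhF, walkA, hx]
    | some p =>
      by_cases hp : p = source
      · simp [fhF, walkA, hx, hp]
      · obtain ⟨k1, hk1, hTp⟩ := Tm_pos prev source hx hp h
        have hk : k1 = k := by omega
        subst hk
        simp only [fhF, walkA, hx, if_neg hp]
        exact ih p f1 hTp (by omega)

theorem get?_foldl_insert_const (l : List Int) (m : PySem.Dict Int (Option Int))
    (v : Option Int) (y : Int) :
    (l.foldl (fun m x => m.insert x v) m).get? y = if y ∈ l then some v else m.get? y := by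
  induction l generalizing m with
  | nil => simp
  | cons a l ih =>
    simp only [List.foldl_cons]
    rw [ih]
    rw [PySem.Dict.get?_insert]
    by_cases h1 : y ∈ l <;> by_cases h2 : y = a <;> simp [h1, h2, List.mem_cons]

theorem collectB_spec (prev : List (Int × Option Int)) (source : Int) (F : Nat) :
    ∀ (fuel k : Nat) (x : Int) (memo : PySem.Dict Int (Option Int)) (path : List Int),
      Tm prev source x k → k < fuel → k ≤ F → InvM prev source F memo →
      ∃ M extra c,
        collectB (PySem.Dict.ofList prev) source fuel x memo path = (M, path ++ extra, c) ∧
        (∀ y ∈ extra, fhF prev source F y = fhF prev source F c) ∧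
        fhF prev source F x = fhF prev source F c ∧
        (x ∈ extra ∨ c = x) ∧
        InvM prev source F M ∧
        M.get? c = some (fhF prev source F c) := by
  intro fuel
  induction fuel with
  | zero => intro k x memo path _ hk _ _; omega
  | succ f ih =>
    intro k x memo path hT hk hkF hInv
    have hk0 : k ≠ 0 := fun h0 => Tm_zero_false prev source x (h0 ▸ hT)
    obtain ⟨F1, rfl⟩ : ∃ F1, F = F1 + 1 := ⟨F - 1, by omega⟩
    by_cases hm : memo.contains x
    · have hs : (memo.get? x).isSome := by
        rw [← PySem.Dict.contains_eq_isSome_get? memo x]; exact hm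
      obtain ⟨v, hv⟩ := Option.isSome_iff_exists.mp hs
      refine ⟨memo, [], x, ?_, by simp, rfl, Or.inr rfl, hInv, ?_⟩
      · simp [collectB, hm]
      · rw [hv, hInv x v hv]
    · cases hx : (PySem.Dict.ofList prev).getD x none with
      | none =>
        have hfh : fhF prev source (F1 + 1) x = none := by simp [fhF, hx]
        refine ⟨memo.insert x none, [], x, ?_, by simp, rfl, Or.inr rfl, ?_, ?_⟩
        · simp [collectB, hm, hx]
        · intro y v hy
          rw [PySem.Dict.get?_insert] at hy
          split at hy
          · rename_i hyx; subst hyx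
            rw [hfh]; exact (Option.some_inj.mp hy).symm
          · exact hInv y v hy
        · rw [PySem.Dict.get?_insert_self, hfh]
      | some p =>
        by_cases hp : p = source
        · have hfh : fhF prev source (F1 + 1) x = some x := by simp [fhF, hx, hp]
          refine ⟨memo.insert x (some x), [], x, ?_, by simp, rfl, Or.inr rfl, ?_, ?_⟩
          · simp [collectB, hm, hx, hp]
          · intro y v hy
            rw [PySem.Dict.get?_insert] at hy
            split at hy
            · rename_i hyx; subst hyx
              rw [hfh]; exact (Option.some_inj.mp hy).symm
            · exact hInv y v hy
          · rw [PySem.Dict.get?_insert_self, hfh]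
        · obtain ⟨k1, hk1, hTp⟩ := Tm_pos prev source hx hp hT
          obtain ⟨M, extra0, c, hcb, hall, hfc, hmem, hInv', hget⟩ :=
            ih k1 p memo (path ++ [x]) hTp (by omega) (by omega) hInv
          have hfx : fhF prev source (F1 + 1) x = fhF prev source (F1 + 1) p := by
            have h1 : fhF prev source (F1 + 1) x = fhF prev source F1 p := by
              simp [fhF, hx, hp]
            rw [h1]
            exact fhF_stable prev source k1 p F1 (F1 + 1) hTp (by omega) (by omega)
          refine ⟨M, x :: extra0, c, ?_, ?_, ?_, Or.inl (List.mem_cons_self), hInv', hget⟩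
          · have : collectB (PySem.Dict.ofList prev) source (f + 1) x memo path =
                collectB (PySem.Dict.ofList prev) source f p memo (path ++ [x]) := by
              simp [collectB, hm, hx, hp]
            rw [this, hcb]
            simp
          · intro y hy
            rcases List.mem_cons.mp hy with hy | hy
            · rw [hy, hfx]; exact hfc
            · exact hall y hy
          · rw [hfx]; exact hfc

theorem fold_eq (prev : List (Int × Option Int)) (source : Int) :
    ∀ (items : List (Int × Option Int)) (memo : PySem.Dict Int (Option Int))
      (tA : PySem.Dict Int Int),
      (∀ q ∈ items, Tm prev source q.1 (prev.length + 1)) →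
      InvM prev source (prev.length + 2) memo →
      (items.foldl
        (fun (st : PySem.Dict Int (Option Int) × PySem.Dict Int Int) np =>
          if np.1 = source ∨ np.2 = none then st
          else
            let r := collectB (PySem.Dict.ofList prev) source (prev.length + 2) np.1 st.1 []
            let res := r.1.getD r.2.2 none
            let memo2 := r.2.1.foldl (fun m x => m.insert x res) r.1
            let nh := match memo2.getD np.1 none with
                      | some v => v
                      | none => np.1
            (memo2, st.2.insert np.1 nh))
        (memo, tA)).2
      = items.foldl
          (fun (table : PySem.Dict Int Int) np =>
            if np.1 = source ∨ np.2 = none then table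
            else
              let cur := walkA (PySem.Dict.ofList prev) source (prev.length + 1) np.1
              let nh := if (PySem.Dict.ofList prev).getD cur none = some source then cur else np.1
              table.insert np.1 nh)
          tA := by
  intro items
  induction items with
  | nil => intro memo tA _ _; rfl
  | cons q items ih =>
    intro memo tA hT hInv
    have hTrest : ∀ r ∈ items, Tm prev source r.1 (prev.length + 1) :=
      fun r hr => hT r (List.mem_cons_of_mem _ hr)
    by_cases hq : q.1 = source ∨ q.2 = none
    · simp only [List.foldl_cons, if_pos hq]
      exact ih memo tA hTrest hInv
    · have hTq := hT q List.mem_cons_self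
      obtain ⟨M, extra, c, hcb, hall, hfc, hmem, hInvM, hget⟩ :=
        collectB_spec prev source (prev.length + 2) (prev.length + 2) (prev.length + 1)
          q.1 memo [] hTq (by omega) (by omega) hInv
      rw [List.nil_append] at hcb
      simp only [List.foldl_cons, if_neg hq]
      rw [hcb]
      simp only
      have hres : M.getD c none = fhF prev source (prev.length + 2) c := by
        rw [PySem.Dict.getD_eq_get?_getD, hget]; rfl
      rw [hres]
      have hgf := get?_foldl_insert_const extra M (fhF prev source (prev.length + 2) c)
      have hnode : (extra.foldl (fun m x => m.insert x (fhF prev source (prev.length + 2) c)) M).get? q.1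
          = some (fhF prev source (prev.length + 2) q.1) := by
        rw [hgf q.1]
        by_cases hin : q.1 ∈ extra
        · rw [if_pos hin, hfc]
        · rw [if_neg hin]
          rcases hmem with h | h
          · exact absurd h hin
          · rw [h] at hget; exact hget
      have hInv2 : InvM prev source (prev.length + 2)
          (extra.foldl (fun m x => m.insert x (fhF prev source (prev.length + 2) c)) M) := by
        intro y v hy
        rw [hgf y] at hy
        split at hy
        · rename_i hyin
          rw [hall y hyin]
          exact (Option.some_inj.mp hy).symm
        · exact hInvM y v hy
      have hgetD : (extra.foldl (fun m x => m.insert x (fhF prev source (prev.length + 2) c)) M).getD q.1 none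
          = fhF prev source (prev.length + 2) q.1 := by
        rw [PySem.Dict.getD_eq_get?_getD, hnode]; rfl
      rw [hgetD]
      have hchar : fhF prev source (prev.length + 2) q.1 =
          (if (PySem.Dict.ofList prev).getD (walkA (PySem.Dict.ofList prev) source (prev.length + 1) q.1) none = some source
           then some (walkA (PySem.Dict.ofList prev) source (prev.length + 1) q.1) else none) := by
        rw [← fhF_stable prev source (prev.length + 1) q.1 (prev.length + 1) (prev.length + 2) hTq (by omega) (by omega)]
        exact fhF_walkA prev source (prev.length + 1) q.1 (prev.length + 1) hTq (by omega)
      rw [hchar]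
      have hsame :
          (match (if (PySem.Dict.ofList prev).getD (walkA (PySem.Dict.ofList prev) source (prev.length + 1) q.1) none = some source
                  then some (walkA (PySem.Dict.ofList prev) source (prev.length + 1) q.1) else none : Option Int) with
            | some v => v
            | none => q.1)
          = (if (PySem.Dict.ofList prev).getD (walkA (PySem.Dict.ofList prev) source (prev.length + 1) q.1) none = some source
             then walkA (PySem.Dict.ofList prev) source (prev.length + 1) q.1 else q.1) := by
        split_ifs <;> rfl
      rw [hsame]
      exact ih _ _ hTrest hInv2

theorem keys_sub (prev : List (Int × Option Int)) (q : Int × Option Int)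
    (hq : q ∈ (PySem.Dict.ofList prev).items) : ∃ w, (q.1, w) ∈ prev := by
  have hk : q.1 ∈ (PySem.Dict.ofList prev).keys := PySem.Dict.mem_keys_of_mem_items _ hq
  have : (PySem.Dict.ofList prev).keys = PySem.Set.update PySem.Dict.empty.keys (prev.map Prod.fst) :=
    PySem.Dict.keys_foldl_insert_key prev Prod.fst (fun _ p => p.2) PySem.Dict.empty
  rw [this, PySem.Set.mem_update, PySem.Dict.keys_empty] at hk
  rcases hk with h | h
  · simp at h
  · obtain ⟨pr, hpr, hfst⟩ := List.mem_map.mp h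
    exact ⟨pr.2, by rw [← hfst]; exact hpr⟩

-- ===== VERDICT (by name: the statement is the Claim_ definition above) =====
theorem next_hop_table_spec : Claim_equal_next_hop_table := by
  intro prev source _hDom hPre
  show next_hop_table prev source = next_hop_table_alt prev source
  have hT : ∀ q ∈ (PySem.Dict.ofList prev).items, Tm prev source q.1 (prev.length + 1) := by
    intro q hq
    obtain ⟨w, hw⟩ := keys_sub prev q hq
    exact hPre (q.1, w) hw
  have hInv0 : InvM prev source (prev.length + 2) PySem.Dict.empty := by
    intro y v hy
    rw [PySem.Dict.get?_empty] at hy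
    cases hy
  exact (congrArg PySem.Dict.items
    (fold_eq prev source (PySem.Dict.ofList prev).items PySem.Dict.empty PySem.Dict.empty hT hInv0)).symm
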